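-- pv_equiv track=rewrite | github.com/Waterdud/agilesed-tarkvara | main.py | LogsKuvamine
-- ===== SOURCE A (Python) =====
-- def LogsKuvamine(logs):
--     jag = 0
--     kor = 0
--     liit = 0
--     lahut = 0
--     for elem in logs:
--         if elem == 'korutamine':
--             kor += 1
--         elif elem == 'jaganamine':
--             jag += 1
--         elif elem == 'liitumine':
--             liit += 1
--         elif elem == 'lahutamine':
--             lahut += 1
--     return [jag, kor, liit, lahut]
-- ===== SOURCE B (Python) =====
-- def LogsKuvamine(logs):
--     return [list.count(logs, k)
--             for k in ('jaganamine', 'korutamine', 'liitumine', 'lahutamine')]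
-- ===== Notes on version B (the rewrite author's own statement) =====
-- stated objective: simpler
-- what changed: Replaced the single pass with four named accumulators and an if/elif chain by four independent list.count scans, one per operation name, assembled in a comprehension over the required key order.
import Mathlib
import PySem

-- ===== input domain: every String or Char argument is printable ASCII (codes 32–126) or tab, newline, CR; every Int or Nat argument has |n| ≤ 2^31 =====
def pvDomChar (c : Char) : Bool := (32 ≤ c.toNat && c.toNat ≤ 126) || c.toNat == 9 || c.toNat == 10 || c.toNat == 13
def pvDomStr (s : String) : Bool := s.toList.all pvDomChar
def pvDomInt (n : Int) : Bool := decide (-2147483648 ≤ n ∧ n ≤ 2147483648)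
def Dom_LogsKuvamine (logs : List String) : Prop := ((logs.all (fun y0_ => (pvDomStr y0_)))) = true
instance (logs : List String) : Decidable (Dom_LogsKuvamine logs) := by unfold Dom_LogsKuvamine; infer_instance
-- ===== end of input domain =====

-- B replaces the single-pass four-accumulator if/elif loop with four independent list.count scans in a comprehension (simpler; same cost).


-- ===== PORT A =====
-- literal transliteration: the loop over logs carrying A's four counters (tail recursion = the for-loop), branches in A's order
def LKloop (logs : List String) (jag kor liit lahut : Int) : List Int :=
  match logs with
  | [] => [jag, kor, liit, lahut]
  | elem :: rest =>
    if elem == "korutamine" then LKloop rest jag (kor + 1) liit lahut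
    else if elem == "jaganamine" then LKloop rest (jag + 1) kor liit lahut
    else if elem == "liitumine" then LKloop rest jag kor (liit + 1) lahut
    else if elem == "lahutamine" then LKloop rest jag kor liit (lahut + 1)
    else LKloop rest jag kor liit lahut

def LogsKuvamine (logs : List String) : List Int := LKloop logs 0 0 0 0

-- ===== PORT B =====
-- transliteration of Source B: map list.count over the four keys in order
def LogsKuvamine_alt (logs : List String) : List Int :=
  ["jaganamine", "korutamine", "liitumine", "lahutamine"].map
    (fun k => (PySem.List.count logs k : Int))

-- ===== PRECONDITION & SPEC =====
def Spec_LogsKuvamine (logs : List String) (out : List Int) : Prop := out = LogsKuvamine_alt logs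
instance (logs : List String) (out : List Int) : Decidable (Spec_LogsKuvamine logs out) := by unfold Spec_LogsKuvamine; infer_instance

-- ===== CLAIM =====
def Claim_equal_LogsKuvamine : Prop := ∀ (logs : List String), Dom_LogsKuvamine logs → Spec_LogsKuvamine logs (LogsKuvamine logs)

-- ===== LEMMAS AND PROOFS =====

-- A's loop returns the starting accumulators plus the counts of the four words
theorem LKloop_eq (logs : List String) (jag kor liit lahut : Int) :
    LKloop logs jag kor liit lahut
    = [jag + logs.count "jaganamine", kor + logs.count "korutamine",
       liit + logs.count "liitumine", lahut + logs.count "lahutamine"] := by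
  induction logs generalizing jag kor liit lahut with
  | nil => simp [LKloop]
  | cons x xs ih =>
    rw [LKloop]
    split_ifs with h1 h2 h3 h4 <;> simp_all <;> ring_nf

-- ===== VERDICT =====
theorem LogsKuvamine_spec : Claim_equal_LogsKuvamine := by
  intro logs _
  unfold Spec_LogsKuvamine LogsKuvamine LogsKuvamine_alt
  simp [LKloop_eq, PySem.List.count_eq]
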